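-- pv_equiv track=rewrite | github.com/codermore/PythonEjercicios | TP39.py | mascara
-- ===== SOURCE A (Python) =====
-- def mascara (palabra,caracter,num):
--     x=0
--     retorno = ""
--     for letra in palabra:
--         if x<num:
--             retorno += caracter
--         else:
--             retorno += letra
--         x+=1
--     return retorno
-- ===== SOURCE B (Python) =====
-- def mascara(palabra, caracter, num):
--     n = max(num, 0)
--     return caracter * min(n, len(palabra)) + palabra[n:]
-- ===== Notes on version B (the rewrite author's own statement) =====
-- stated objective: simpler
-- what changed: B builds the result as string-repetition of the mask character times the clamped prefix length concatenated with a slice of the untouched suffix, instead of A's character-by-character loop with a position counter and an if/else.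
import Mathlib
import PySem

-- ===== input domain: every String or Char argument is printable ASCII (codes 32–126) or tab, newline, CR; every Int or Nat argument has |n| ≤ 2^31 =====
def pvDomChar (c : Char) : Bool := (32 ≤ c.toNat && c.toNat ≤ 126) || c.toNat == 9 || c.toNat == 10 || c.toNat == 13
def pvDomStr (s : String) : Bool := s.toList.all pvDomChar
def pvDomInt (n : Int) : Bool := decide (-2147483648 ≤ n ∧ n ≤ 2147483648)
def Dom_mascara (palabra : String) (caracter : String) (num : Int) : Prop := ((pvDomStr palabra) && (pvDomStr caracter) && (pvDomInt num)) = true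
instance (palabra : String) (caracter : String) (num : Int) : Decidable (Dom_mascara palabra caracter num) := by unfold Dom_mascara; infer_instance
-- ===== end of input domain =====

-- B replaces A's per-character loop with repeated-character prefix + slice suffix; objective: simpler.

-- ===== PORT A =====
-- the for loop over palabra with counter x and accumulator retorno (kept as List Char, stringified at return)
def mascaraLoop (c : List Char) (num : Int) : List Char → Int → List Char → List Char
  | [], _, ret => ret
  | letra :: rest, x, ret => mascaraLoop c num rest (x + 1) (ret ++ if x < num then c else [letra])

def mascara (palabra : String) (caracter : String) (num : Int) : String :=
  String.ofList (mascaraLoop caracter.toList num palabra.toList 0 [])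

-- ===== PORT B =====
def mascara_alt (palabra : String) (caracter : String) (num : Int) : String :=
  String.ofList (PySem.List.pyRepeat caracter.toList (min (max num 0) (palabra.toList.length : Int))
             ++ PySem.List.slice palabra.toList (some (max num 0)) none)

-- ===== PRECONDITION & SPEC =====
def Spec_mascara (palabra : String) (caracter : String) (num : Int) (out : String) : Prop := out = mascara_alt palabra caracter num
instance (palabra : String) (caracter : String) (num : Int) (out : String) : Decidable (Spec_mascara palabra caracter num out) := by unfold Spec_mascara; infer_instance

-- ===== CLAIM (what is proved, stated in full; the proofs are below) =====
def Claim_equal_mascara : Prop := ∀ (palabra : String) (caracter : String) (num : Int), Dom_mascara palabra caracter num → Spec_mascara palabra caracter num (mascara palabra caracter num)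

-- ===== LEMMAS AND PROOFS =====

-- loop invariant: from counter x, the loop appends (num - x)⁺ (clamped to the remaining length)
-- copies of the mask followed by the rest of the word
theorem mascaraLoop_eq (c : List Char) (num : Int) :
    ∀ (cs : List Char) (x : Int) (ret : List Char),
      mascaraLoop c num cs x ret =
        ret ++ (List.replicate (min (num - x).toNat cs.length) c).flatten
            ++ cs.drop (num - x).toNat := by
  intro cs
  induction cs with
  | nil => intro x ret; simp [mascaraLoop]
  | cons h t ih =>
    intro x ret
    simp only [mascaraLoop, ih]
    by_cases hx : x < num
    · have hm : (num - x).toNat = (num - (x + 1)).toNat + 1 := by omega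
      have hmin : min (num - x).toNat (h :: t).length
          = min (num - (x + 1)).toNat t.length + 1 := by
        simp only [List.length_cons]; omega
      simp [hx, hm, List.replicate_succ, List.append_assoc]
    · have hm : (num - x).toNat = 0 := by omega
      have hm' : (num - (x + 1)).toNat = 0 := by omega
      simp [hx, hm, hm']

-- ===== VERDICT (by name: the statement is the Claim_ definition above) =====
theorem mascara_spec : Claim_equal_mascara := by
  intro palabra caracter num _
  unfold Spec_mascara mascara mascara_alt
  rw [mascaraLoop_eq]
  rw [PySem.List.slice_from palabra.toList (a := max num 0) (by omega)]
  have h1 : (max num 0).toNat = num.toNat := by omega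
  have h2 : (min (max num 0) ((palabra.length : Int))).toNat = min num.toNat palabra.length := by omega
  simp [PySem.List.pyRepeat, h1, h2]
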